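-- pv_equiv track=rewrite | github.com/CSStudySession/AlgoInPython | Pins/Pins number of engagements for time intervals.py | calculate_engagement
-- ===== SOURCE A (Python) =====
-- from typing import List
--
-- def calculate_engagement(intervals:List[List[int]]) -> List[tuple]:
--     if not intervals:
--         return []
--     # 提取所有的开始时间和结束时间 并标记它们是开始还是结束
--     events = []
--     for start, end in intervals:
--         events.append((start, 'start'))
--         events.append((end, 'end'))
--     # 按时间点进行排序
--     events.sort()
--     cur_egmt = 0  # 当前的参与度
--     result = []   # list of tuple:(interval_start, interval_end, egmt_num)
--     # 遍历所有的时间点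
--     for i in range(len(events) - 1):
--         time, event_type = events[i]
--         next_time = events[i + 1][0]
--
--         if event_type == 'start':
--             cur_egmt += 1
--         else:
--             cur_egmt -= 1
--
--         # 如果当前时间与下一个时间不相同，则记录该时间段的参与度: 只在实际的时间区间发生变化时记录参与度
--         # 排序后 相邻的事件可能会有相同的时间点 比如在两个活动同时结束的情况
--         if time != next_time:
--             result.append((time, next_time, cur_egmt))
--     return result
-- ===== SOURCE B (Python) =====
-- from typing import List
--
-- def _bisect_right(a, x):
--     # standard bisect_right (hand-written: this module imports nothing but typing)
--     lo, hi = 0, len(a)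
--     while lo < hi:
--         mid = (lo + hi) // 2
--         if x < a[mid]:
--             hi = mid
--         else:
--             lo = mid + 1
--     return lo
--
-- def calculate_engagement(intervals: List[List[int]]) -> List[tuple]:
--     # Order-statistics approach: no event sweep, no running counter.  The engagement on the
--     # segment starting at boundary t equals (#starts <= t) - (#ends <= t), found by binary
--     # search in the two independently sorted boundary arrays.
--     starts = sorted(s for s, e in intervals)
--     ends = sorted(e for s, e in intervals)
--     times = sorted(set(starts + ends))
--     result = []
--     for j in range(len(times) - 1):
--         t = times[j]
--         result.append((t, times[j + 1], _bisect_right(starts, t) - _bisect_right(ends, t)))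
--     return result
-- ===== Notes on version B (the rewrite author's own statement) =====
-- stated objective: alternative
-- what changed: A sweeps 2n sorted labelled ('start'/'end') events with a running +1/-1 counter; B has no sweep and no running state: it sorts the start and end boundaries into two independent arrays and computes each segment's engagement directly as (#starts <= t) - (#ends <= t) by binary search in those arrays.
import Mathlib
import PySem

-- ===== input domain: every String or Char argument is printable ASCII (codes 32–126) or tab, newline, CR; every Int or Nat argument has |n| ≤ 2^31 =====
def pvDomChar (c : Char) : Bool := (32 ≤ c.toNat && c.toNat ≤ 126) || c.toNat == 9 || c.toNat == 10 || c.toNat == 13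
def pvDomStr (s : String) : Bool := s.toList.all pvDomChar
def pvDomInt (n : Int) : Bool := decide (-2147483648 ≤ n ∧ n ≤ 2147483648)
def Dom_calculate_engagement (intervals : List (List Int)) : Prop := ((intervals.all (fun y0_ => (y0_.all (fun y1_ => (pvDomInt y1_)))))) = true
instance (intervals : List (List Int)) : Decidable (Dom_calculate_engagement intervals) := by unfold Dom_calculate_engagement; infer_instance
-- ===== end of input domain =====

-- B replaces A's sweep over 2n sorted labelled ('start'/'end') events and its running +1/-1
-- counter by per-segment order statistics: binary search in the two independently sorted
-- boundary arrays gives each segment's count directly (objective: alternative).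

-- ===== PORT A =====
def calculate_engagement (intervals : List (List Int)) : List (Int × Int × Int) :=
  if intervals = [] then []
  else
    -- events.append((start,'start')); events.append((end,'end'))
    let events : List (Int × String) := intervals.foldl
      (fun ev iv => ev ++ [(PySem.List.pyGetD iv 0 0, "start"), (PySem.List.pyGetD iv 1 0, "end")]) []
    -- events.sort()  (tuples compare lexicographically)
    let events' := PySem.List.sorted2 events Prod.fst Prod.snd false
    -- for i in range(len(events) - 1): …
    ((PySem.List.pyRange 0 ((events'.length : Int) - 1) 1).foldl
      (fun (st : Int × List (Int × Int × Int)) i =>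
        let time := (PySem.List.pyGetD events' i (0, "")).1
        let event_type := (PySem.List.pyGetD events' i (0, "")).2
        let next_time := (PySem.List.pyGetD events' (i + 1) (0, "")).1
        let cur := if event_type = "start" then st.1 + 1 else st.1 - 1
        (cur, if time ≠ next_time then st.2 ++ [(time, next_time, cur)] else st.2))
      (0, [])).2

-- ===== PORT B =====
def calculate_engagement_alt (intervals : List (List Int)) : List (Int × Int × Int) :=
  -- starts = sorted(s for s, e in intervals); ends = sorted(e for s, e in intervals)
  let starts := PySem.List.sorted (intervals.map (fun iv => PySem.List.pyGetD iv 0 0)) (fun s => s) false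
  let ends := PySem.List.sorted (intervals.map (fun iv => PySem.List.pyGetD iv 1 0)) (fun s => s) false
  -- times = sorted(set(starts + ends))
  let times := PySem.List.sorted (PySem.Set.ofList (starts ++ ends)) (fun t => t) false
  -- for j in range(len(times) - 1): result.append((t, times[j+1], _bisect_right(starts, t) - _bisect_right(ends, t)))
  -- Source B's hand-written _bisect_right is the standard bisect_right lo/hi binary-search loop,
  -- ported as the prelude's PySem.List.bisectRight (the identical loop).
  (PySem.List.pyRange 0 ((times.length : Int) - 1) 1).foldl
    (fun (res : List (Int × Int × Int)) j =>
      let t := PySem.List.pyGetD times j 0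
      res ++ [(t, PySem.List.pyGetD times (j + 1) 0,
               (PySem.List.bisectRight starts t : Int) - (PySem.List.bisectRight ends t : Int))]) []

-- ===== PRECONDITION & SPEC =====
-- Pre_ excludes exactly the inputs on which Python A raises ValueError: an inner list whose
-- length is not 2 fails the 'for start, end in intervals' unpacking (B raises there too).
def Pre_calculate_engagement (intervals : List (List Int)) : Prop :=
  ∀ iv ∈ intervals, iv.length = 2
instance (intervals : List (List Int)) : Decidable (Pre_calculate_engagement intervals) := by
  unfold Pre_calculate_engagement; infer_instance

def pvWitness_calculate_engagement : List (List Int) := [[1, 3], [2, 4], [3, 3]]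

def Spec_calculate_engagement (intervals : List (List Int)) (out : List (Int × Int × Int)) : Prop := out = calculate_engagement_alt intervals
instance (intervals : List (List Int)) (out : List (Int × Int × Int)) : Decidable (Spec_calculate_engagement intervals out) := by unfold Spec_calculate_engagement; infer_instance

-- ===== CLAIM (what is proved, stated in full; the proofs are below) =====
def Claim_equal_calculate_engagement : Prop := ∀ (intervals : List (List Int)), Dom_calculate_engagement intervals → Pre_calculate_engagement intervals → Spec_calculate_engagement intervals (calculate_engagement intervals)

-- ===== LEMMAS AND PROOFS =====

def wt (ty : String) : Int := if ty = "start" then 1 else -1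
-- net delta of the event multiset E at time t
def dlt (E : List (Int × String)) (t : Int) : Int :=
  (E.map (fun e => if e.1 = t then wt e.2 else 0)).sum
-- cumulative engagement: sum of weights of all events at times ≤ t (resp. < t)
def cum (E : List (Int × String)) (t : Int) : Int :=
  (E.map (fun e => if e.1 ≤ t then wt e.2 else 0)).sum
def cumlt (E : List (Int × String)) (t : Int) : Int :=
  (E.map (fun e => if e.1 < t then wt e.2 else 0)).sum
-- A's loop as structural recursion over the sorted event list
def segsA : Int → List (Int × String) → List (Int × Int × Int)
  | _, [] => []
  | _, [_] => []
  | cur, (t, ty) :: (t', ty') :: rest =>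
      let c := if ty = "start" then cur + 1 else cur - 1
      (if t ≠ t' then [(t, t', c)] else []) ++ segsA c ((t', ty') :: rest)
-- prefix-sum form over distinct times (bridge between A and B)
def segsB (δ : Int → Int) : Int → List Int → List (Int × Int × Int)
  | _, [] => []
  | _, [_] => []
  | cur, t :: t' :: rest => (t, t', cur + δ t) :: segsB δ (cur + δ t) (t' :: rest)
-- closed-form per-segment counting (B's shape): no running state
def segsC (F : Int → Int) : List Int → List (Int × Int × Int)
  | [] => []
  | [_] => []
  | t :: t' :: rest => (t, t', F t) :: segsC F (t' :: rest)
-- ordered dedup of an already-sorted time list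
def dtimes : List Int → List Int
  | [] => []
  | [t] => [t]
  | t :: t' :: r => if t = t' then dtimes (t' :: r) else t :: dtimes (t' :: r)

lemma segsB_congr (δ δ' : Int → Int) (cur : Int) (T : List Int)
    (h : ∀ t ∈ T, δ t = δ' t) : segsB δ cur T = segsB δ' cur T := by
  induction T generalizing cur with
  | nil => simp [segsB]
  | cons t rest ih =>
    cases rest with
    | nil => simp [segsB]
    | cons t' r =>
      have ht : δ t = δ' t := h t List.mem_cons_self
      simp only [segsB, ht]
      rw [ih _ (fun s hs => h s (List.mem_cons_of_mem _ hs))]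

lemma dlt_eq_zero (E : List (Int × String)) (t : Int) (h : ∀ e ∈ E, e.1 ≠ t) : dlt E t = 0 := by
  unfold dlt
  apply List.sum_eq_zero
  intro x hx
  simp only [List.mem_map] at hx
  obtain ⟨e, he, rfl⟩ := hx
  simp [h e he]

lemma zip_fold_eq_segsA (E : List (Int × String)) :
    ∀ (cur : Int) (res : List (Int × Int × Int)),
    ((E.zip E.tail).foldl
      (fun (st : Int × List (Int × Int × Int)) p =>
        let cur := if p.1.2 = "start" then st.1 + 1 else st.1 - 1
        (cur, if p.1.1 ≠ p.2.1 then st.2 ++ [(p.1.1, p.2.1, cur)] else st.2)) (cur, res)).2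
    = res ++ segsA cur E := by
  induction E with
  | nil => simp [segsA]
  | cons a E' ih =>
    cases E' with
    | nil => simp [segsA]
    | cons b r =>
      intro cur res
      obtain ⟨t, ty⟩ := a
      obtain ⟨t', ty'⟩ := b
      simp only [List.tail_cons, List.zip_cons_cons, List.foldl_cons]
      rw [show ((t',ty') :: r : List (Int × String)).zip r = ((t',ty') :: r).zip (((t',ty') :: r).tail) from rfl]
      rw [ih]
      simp only [segsA]
      by_cases hne : t ≠ t' <;> simp [hne, List.append_assoc]

lemma zip_fold_eq_segsC (F : Int → Int) (T : List Int) :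
    ∀ (res : List (Int × Int × Int)),
    (T.zip T.tail).foldl (fun res p => res ++ [(p.1, p.2, F p.1)]) res
    = res ++ segsC F T := by
  induction T with
  | nil => simp [segsC]
  | cons t T' ih =>
    cases T' with
    | nil => simp [segsC]
    | cons t' r =>
      intro res
      simp only [List.tail_cons, List.zip_cons_cons, List.foldl_cons]
      rw [show (t' :: r : List Int).zip r = (t' :: r).zip ((t' :: r).tail) from rfl]
      rw [ih]
      simp [segsC]

lemma dtimes_cons_head (m : List Int) : ∀ t : Int, ∃ u, dtimes (t :: m) = t :: u := by
  induction m with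
  | nil => intro t; exact ⟨[], rfl⟩
  | cons x r ih =>
    intro t
    by_cases h : t = x
    · obtain ⟨u, hu⟩ := ih x
      exact ⟨u, by simp [dtimes, h, hu]⟩
    · exact ⟨dtimes (x :: r), by simp [dtimes, h]⟩

lemma mem_dtimes_iff (l : List Int) (s : Int) : s ∈ dtimes l ↔ s ∈ l := by
  induction l using dtimes.induct with
  | case1 => simp [dtimes]
  | case2 t => simp [dtimes]
  | case3 t' r ih => simp only [dtimes]; simp [ih]
  | case4 t t' r h ih => simp only [dtimes, if_neg h]; simp [ih]

lemma dtimes_pairwise_lt (l : List Int) (h : l.Pairwise (· ≤ ·)) :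
    (dtimes l).Pairwise (· < ·) := by
  induction l using dtimes.induct with
  | case1 => simp [dtimes]
  | case2 t => simp [dtimes]
  | case3 t' r ih =>
    simp only [dtimes]
    exact ih (List.pairwise_cons.mp h).2
  | case4 t t' r hne ih =>
    simp only [dtimes, if_neg hne]
    obtain ⟨h1, h2⟩ := List.pairwise_cons.mp h
    refine List.pairwise_cons.mpr ⟨?_, ih h2⟩
    intro s hs
    rw [mem_dtimes_iff] at hs
    rcases List.mem_cons.mp hs with rfl | hs
    · exact lt_of_le_of_ne (h1 _ List.mem_cons_self) hne
    · have ht' : t ≤ t' := h1 _ List.mem_cons_self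
      have h3 := (List.pairwise_cons.mp h2).1 _ hs
      have h4 := lt_of_le_of_ne ht' hne
      omega

lemma sorted2_eq_sorted_lex (xs : List (Int × String)) :
    PySem.List.sorted2 xs Prod.fst Prod.snd false
      = PySem.List.sorted xs (fun e => (toLex e : Lex (Int × String))) false := by
  rw [PySem.List.sorted_eq_foldl_insertBy]
  show List.foldl
      (fun acc x => PySem.List.insertBy
        (fun a b => decide (a.1 < b.1) || (!decide (b.1 < a.1) && decide (a.2 < b.2))) x acc) [] xs
    = _
  have hfn : (fun (a b : Int × String) => decide (a.1 < b.1) || (!decide (b.1 < a.1) && decide (a.2 < b.2)))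
      = (fun a b => decide ((toLex a : Lex (Int × String)) < toLex b)) := by
    funext a b
    rw [Bool.eq_iff_iff]
    simp only [Bool.or_eq_true, Bool.and_eq_true, Bool.not_eq_true', decide_eq_true_eq,
      decide_eq_false_iff_not]
    rcases lt_trichotomy a.1 b.1 with h | h | h
    · constructor
      · intro _; exact Prod.Lex.toLex_lt_toLex.mpr (Or.inl h)
      · intro _; exact Or.inl h
    · have h1 : ¬ a.1 < b.1 := by omega
      have h2 : ¬ b.1 < a.1 := by omega
      constructor
      · rintro (hc | ⟨_, hc⟩)
        · exact absurd hc h1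
        · exact Prod.Lex.toLex_lt_toLex.mpr (Or.inr ⟨h, hc⟩)
      · intro hc
        rcases Prod.Lex.toLex_lt_toLex.mp hc with hc | ⟨_, hc⟩
        · exact absurd hc h1
        · exact Or.inr ⟨h2, hc⟩
    · have h1 : ¬ a.1 < b.1 := by omega
      have h2 : a.1 ≠ b.1 := by omega
      constructor
      · rintro (hc | ⟨hc, _⟩)
        · exact absurd hc h1
        · exact absurd h hc
      · intro hc
        rcases Prod.Lex.toLex_lt_toLex.mp hc with hc | ⟨hc, _⟩
        · exact absurd hc h1
        · exact absurd hc h2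
  rw [hfn]

lemma sorted2_pairwise_fst (xs : List (Int × String)) :
    (PySem.List.sorted2 xs Prod.fst Prod.snd false).Pairwise (fun a b => a.1 ≤ b.1) := by
  rw [sorted2_eq_sorted_lex]
  have h := PySem.List.sorted_pairwise xs (fun e => (toLex e : Lex (Int × String)))
  refine h.imp ?_
  intro a b hab
  rcases Prod.Lex.toLex_le_toLex.mp hab with h1 | ⟨h1, _⟩
  · exact le_of_lt h1
  · exact le_of_eq h1

lemma idx_loop_eq_zip (E : List (Int × String)) (st : Int × List (Int × Int × Int)) :
    (PySem.List.pyRange 0 ((E.length : Int) - 1) 1).foldl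
      (fun (st : Int × List (Int × Int × Int)) i =>
        let time := (PySem.List.pyGetD E i (0, "")).1
        let event_type := (PySem.List.pyGetD E i (0, "")).2
        let next_time := (PySem.List.pyGetD E (i + 1) (0, "")).1
        let cur := if event_type = "start" then st.1 + 1 else st.1 - 1
        (cur, if time ≠ next_time then st.2 ++ [(time, next_time, cur)] else st.2)) st
    = (E.zip E.tail).foldl
      (fun (st : Int × List (Int × Int × Int)) p =>
        let cur := if p.1.2 = "start" then st.1 + 1 else st.1 - 1
        (cur, if p.1.1 ≠ p.2.1 then st.2 ++ [(p.1.1, p.2.1, cur)] else st.2)) st := by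
  rcases E with _ | ⟨a, E'⟩
  · simp [PySem.List.pyRange_one_eq_nil]
  · set E := a :: E' with hEdef
    have hne : E.length ≠ 0 := by simp [hEdef]
    have hztl : E.tail.length = E.length - 1 := List.length_tail ..
    have hzlen : (E.zip E.tail).length = E.length - 1 := by
      rw [List.length_zip, hztl]; omega
    have hcast : (E.length : Int) - 1 = ((E.zip E.tail).length : Int) := by
      rw [hzlen]; omega
    rw [hcast]
    rw [PySem.List.foldl_congr_mem _ _
      (fun (st : Int × List (Int × Int × Int)) i =>
        (fun (st : Int × List (Int × Int × Int)) p =>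
          let cur := if p.1.2 = "start" then st.1 + 1 else st.1 - 1
          (cur, if p.1.1 ≠ p.2.1 then st.2 ++ [(p.1.1, p.2.1, cur)] else st.2)) st
          (PySem.List.pyGetD (E.zip E.tail) i ((0, ""), (0, "")))) st ?_]
    · exact PySem.List.foldl_pyRange_zero_pyGetD' (E.zip E.tail) ((0, ""), (0, ""))
        (fun (st : Int × List (Int × Int × Int)) p =>
          let cur := if p.1.2 = "start" then st.1 + 1 else st.1 - 1
          (cur, if p.1.1 ≠ p.2.1 then st.2 ++ [(p.1.1, p.2.1, cur)] else st.2)) st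
    · intro acc i hi
      obtain ⟨h0, h1⟩ := PySem.List.mem_pyRange_one.mp hi
      have hiN : i.toNat < (E.zip E.tail).length := by omega
      have hiE : i.toNat < E.length := by omega
      have hiE1 : i.toNat + 1 < E.length := by omega
      have e1 : PySem.List.pyGetD (E.zip E.tail) i ((0, ""), (0, "")) = (E[i.toNat], E[i.toNat + 1]) := by
        rw [PySem.List.pyGetD_eq_getElem _ _ h0 (by exact_mod_cast h1)]
        rw [List.getElem_zip]
        rw [List.getElem_tail]
      have e2 : PySem.List.pyGetD E i ((0 : Int), "") = E[i.toNat] :=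
        PySem.List.pyGetD_eq_getElem _ _ h0 (by omega)
      have e3 : PySem.List.pyGetD E (i + 1) ((0 : Int), "") = E[i.toNat + 1] := by
        rw [PySem.List.pyGetD_eq_getElem _ _ (by omega) (by omega)]
        congr 1
        omega
      simp only [e1, e2, e3]

lemma idx_loopB_eq_zip (T : List Int) (F : Int → Int) (res : List (Int × Int × Int)) :
    (PySem.List.pyRange 0 ((T.length : Int) - 1) 1).foldl
      (fun (res : List (Int × Int × Int)) j =>
        res ++ [(PySem.List.pyGetD T j 0, PySem.List.pyGetD T (j + 1) 0,
                 F (PySem.List.pyGetD T j 0))]) res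
    = (T.zip T.tail).foldl (fun res p => res ++ [(p.1, p.2, F p.1)]) res := by
  rcases T with _ | ⟨a, T'⟩
  · simp [PySem.List.pyRange_one_eq_nil]
  · set T := a :: T' with hTdef
    have hne : T.length ≠ 0 := by simp [hTdef]
    have hztl : T.tail.length = T.length - 1 := List.length_tail ..
    have hzlen : (T.zip T.tail).length = T.length - 1 := by
      rw [List.length_zip, hztl]; omega
    have hcast : (T.length : Int) - 1 = ((T.zip T.tail).length : Int) := by
      rw [hzlen]; omega
    rw [hcast]
    rw [PySem.List.foldl_congr_mem _ _
      (fun (res : List (Int × Int × Int)) i =>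
        (fun res (p : Int × Int) => res ++ [(p.1, p.2, F p.1)]) res
          (PySem.List.pyGetD (T.zip T.tail) i ((0 : Int), (0 : Int)))) res ?_]
    · exact PySem.List.foldl_pyRange_zero_pyGetD' (T.zip T.tail) ((0 : Int), (0 : Int))
        (fun res (p : Int × Int) => res ++ [(p.1, p.2, F p.1)]) res
    · intro acc i hi
      obtain ⟨h0, h1⟩ := PySem.List.mem_pyRange_one.mp hi
      have hiN : i.toNat < (T.zip T.tail).length := by omega
      have hiT : i.toNat < T.length := by omega
      have hiT1 : i.toNat + 1 < T.length := by omega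
      have e1 : PySem.List.pyGetD (T.zip T.tail) i ((0 : Int), (0 : Int)) = (T[i.toNat], T[i.toNat + 1]) := by
        rw [PySem.List.pyGetD_eq_getElem _ _ h0 (by exact_mod_cast h1)]
        rw [List.getElem_zip]
        rw [List.getElem_tail]
      have e2 : PySem.List.pyGetD T i (0 : Int) = T[i.toNat] :=
        PySem.List.pyGetD_eq_getElem _ _ h0 (by omega)
      have e3 : PySem.List.pyGetD T (i + 1) (0 : Int) = T[i.toNat + 1] := by
        rw [PySem.List.pyGetD_eq_getElem _ _ (by omega) (by omega)]
        congr 1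
        omega
      simp only [e1, e2, e3]

-- pointwise: (e.1 < t) + (e.1 = t) = (e.1 ≤ t)
lemma cumlt_add_dlt (E : List (Int × String)) (t : Int) :
    cumlt E t + dlt E t = cum E t := by
  unfold cumlt dlt cum
  rw [← PySem.List.sum_map_add_int]
  apply congrArg
  apply List.map_congr_left
  intro e _
  by_cases h1 : e.1 < t <;> by_cases h2 : e.1 = t <;> simp [h1, h2] <;> omega

lemma segsA_eq_segsB (cur : Int) (E : List (Int × String))
    (h : E.Pairwise (fun a b => a.1 ≤ b.1)) :
    segsA cur E = segsB (dlt E) cur (dtimes (E.map Prod.fst)) := by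
  induction cur, E using segsA.induct with
  | case1 cur => simp [segsA, segsB, dtimes]
  | case2 cur e =>
    obtain ⟨t, ty⟩ := e
    simp [segsA, segsB, dtimes]
  | case3 cur t ty t' ty' rest c ih =>
    obtain ⟨h1, h2⟩ := List.pairwise_cons.mp h
    have hcdef : c = if ty = "start" then cur + 1 else cur - 1 := rfl
    have hc : c = cur + wt ty := by rw [hcdef]; unfold wt; split_ifs <;> omega
    have hmapPW : (((t', ty') :: rest : List (Int × String)).map Prod.fst).Pairwise (· ≤ ·) :=
      List.Pairwise.map Prod.fst (fun a b hab => hab) h2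
    have htt' : t ≤ t' := h1 _ List.mem_cons_self
    by_cases hne : t = t'
    · -- equal adjacent times: no segment emitted, the two deltas at t sum into one key
      subst hne
      simp only [segsA, ne_eq, not_true_eq_false, if_false, List.nil_append, List.map_cons]
      rw [show dtimes (t :: t :: List.map Prod.fst rest) = dtimes (t :: List.map Prod.fst rest) by
        simp [dtimes]]
      rw [ih h2]
      simp only [List.map_cons]
      obtain ⟨u, hu⟩ := dtimes_cons_head (List.map Prod.fst rest) t
      rw [hu]
      cases u with
      | nil => simp [segsB]
      | cons t₂ u' =>
        have hPWlt : (t :: t₂ :: u').Pairwise (· < ·) := by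
          rw [← hu]
          exact dtimes_pairwise_lt _ (by simpa using hmapPW)
        have hgt : ∀ s ∈ t₂ :: u', t < s := (List.pairwise_cons.mp hPWlt).1
        have hδt : dlt ((t, ty) :: (t, ty') :: rest) t
            = wt ty + dlt ((t, ty') :: rest) t := by
          rw [dlt]; simp [dlt]
        have hcur : c + dlt ((t, ty') :: rest) t
            = cur + dlt ((t, ty) :: (t, ty') :: rest) t := by
          rw [hδt, hc]; ring
        simp only [segsB]
        rw [hcur]
        congr 1
        apply segsB_congr
        intro s hs
        have hts : t ≠ s := fun hh => absurd (hgt s hs) (by omega)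
        conv_rhs => rw [show dlt ((t, ty) :: (t, ty') :: rest) s
            = (if t = s then wt ty else 0) + dlt ((t, ty') :: rest) s by simp [dlt]]
        simp [hts]
    · -- strictly larger next time: the segment (t, t', c) is emitted and t is finished
      have hlt : t < t' := lt_of_le_of_ne htt' hne
      have htailne : ∀ e ∈ (t', ty') :: rest, e.1 ≠ t := by
        intro e he
        rcases List.mem_cons.mp he with rfl | he
        · simp; omega
        · have := (List.pairwise_cons.mp h2).1 _ he
          simp at this ⊢
          omega
      simp only [segsA, ne_eq, if_pos hne, List.map_cons, List.singleton_append]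
      rw [show dtimes (t :: t' :: List.map Prod.fst rest)
          = t :: dtimes (t' :: List.map Prod.fst rest) by simp [dtimes, hne]]
      obtain ⟨u, hu⟩ := dtimes_cons_head (List.map Prod.fst rest) t'
      rw [hu]
      have hδt : dlt ((t, ty) :: (t', ty') :: rest) t = wt ty := by
        rw [show dlt ((t, ty) :: (t', ty') :: rest) t
            = (if t = t then wt ty else 0) + dlt ((t', ty') :: rest) t by simp [dlt]]
        rw [dlt_eq_zero _ _ htailne]; simp
      have hcur : cur + dlt ((t, ty) :: (t', ty') :: rest) t = c := by rw [hδt, hc]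
      simp only [segsB]
      rw [hcur]
      congr 1
      rw [ih h2]
      simp only [List.map_cons]
      rw [hu]
      apply segsB_congr
      intro s hs
      have hsm : s ∈ t' :: List.map Prod.fst rest := by
        rw [← mem_dtimes_iff, hu]; exact hs
      have hts : t ≠ s := by
        rcases List.mem_cons.mp hsm with rfl | hsm
        · exact hne
        · obtain ⟨e, he, rfl⟩ := List.mem_map.mp hsm
          have := (List.pairwise_cons.mp h2).1 _ he
          simp at this
          omega
      conv_rhs => rw [show dlt ((t, ty) :: (t', ty') :: rest) s
          = (if t = s then wt ty else 0) + dlt ((t', ty') :: rest) s by simp [dlt]]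
      simp [hts]

-- prefix sums over the distinct-time list ARE the cumulative counts
lemma segsB_eq_segsC (E : List (Int × String)) :
    ∀ T : List Int, T.Pairwise (· < ·) →
    (∀ e ∈ E, e.1 ∈ T ∨ (∀ u ∈ T, e.1 < u)) →
    ∀ cur : Int, (∀ hd, T.head? = some hd → cur = cumlt E hd) →
    segsB (dlt E) cur T = segsC (cum E) T := by
  intro T
  induction T with
  | nil => intro _ _ _ _; simp [segsB, segsC]
  | cons t T' ih =>
    intro hPW hmem cur hcur
    cases T' with
    | nil => simp [segsB, segsC]
    | cons t' r =>
      obtain ⟨hhd, hPW'⟩ := List.pairwise_cons.mp hPW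
      have htt' : t < t' := hhd _ List.mem_cons_self
      have hcurt : cur = cumlt E t := hcur t rfl
      have hemit : cur + dlt E t = cum E t := by rw [hcurt]; exact cumlt_add_dlt E t
      simp only [segsB, segsC, hemit]
      congr 1
      apply ih hPW'
      · intro e he
        rcases hmem e he with hm | hlt
        · rcases List.mem_cons.mp hm with rfl | hm
          · exact Or.inr (by
              intro u hu
              rcases List.mem_cons.mp hu with rfl | hu
              · exact htt'
              · exact lt_trans htt' ((List.pairwise_cons.mp hPW').1 _ hu))
          · exact Or.inl hm
        · exact Or.inr (fun u hu => hlt u (List.mem_cons_of_mem _ hu))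
      · intro hd hhd'
        have hhd2 : t' = hd := by simpa using hhd'
        subst hhd2
        unfold cum cumlt
        apply congrArg
        apply List.map_congr_left
        intro e he
        have hcase : e.1 ≤ t ∨ t' ≤ e.1 := by
          rcases hmem e he with hm | hlt
          · rcases List.mem_cons.mp hm with h | hm
            · exact Or.inl (le_of_eq h)
            · rcases List.mem_cons.mp hm with h | hm
              · exact Or.inr (le_of_eq h.symm)
              · exact Or.inr (le_of_lt ((List.pairwise_cons.mp hPW').1 _ hm))
          · exact Or.inl (le_of_lt (hlt t List.mem_cons_self))
        rcases hcase with h | h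
        · rw [if_pos h, if_pos (by omega)]
        · rw [if_neg (by omega), if_neg (by omega)]
      

-- bisect_right on a sorted list counts the elements ≤ x
lemma countP_eq_of_split (x : Int) :
    ∀ (xs : List Int) (k : Nat), k ≤ xs.length →
    (∀ j (hj : j < xs.length), j < k → xs[j] ≤ x) →
    (∀ j (hj : j < xs.length), k ≤ j → x < xs[j]) →
    xs.countP (fun y => decide (y ≤ x)) = k := by
  intro xs
  induction xs with
  | nil =>
    intro k hk _ _
    simp only [List.length_nil, Nat.le_zero] at hk
    simp [hk]
  | cons y t ih =>
    intro k hk hlo hhi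
    cases k with
    | zero =>
      have hy : x < y := hhi 0 (by simp) (by omega)
      rw [List.countP_cons]
      rw [ih 0 (by omega) (by omega)
        (fun j hj _ => by simpa using hhi (j + 1) (by simpa using Nat.succ_lt_succ hj) (by omega))]
      simp [not_le.mpr hy]
    | succ k' =>
      have hy : y ≤ x := hlo 0 (by simp) (by omega)
      rw [List.countP_cons]
      rw [ih k' (by simpa using hk)
        (fun j hj hjk => by simpa using hlo (j + 1) (by simpa using Nat.succ_lt_succ hj) (by omega))
        (fun j hj hjk => by simpa using hhi (j + 1) (by simpa using Nat.succ_lt_succ hj) (by omega))]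
      simp [hy]

lemma bisectRight_eq_countP (xs : List Int) (x : Int)
    (h : xs.Pairwise (· ≤ ·)) :
    (PySem.List.bisectRight xs x : Nat) = xs.countP (fun y => decide (y ≤ x)) := by
  obtain ⟨h1, h2, h3⟩ := PySem.List.bisectRight_spec xs x h
  exact (countP_eq_of_split x xs _ h1 h2 h3).symm

-- cum over the flatMapped event list is the difference of the two boundary counts
lemma cum_flatMap (t : Int) :
    ∀ l : List (List Int),
    cum (l.flatMap (fun iv => [(PySem.List.pyGetD iv 0 0, "start"), (PySem.List.pyGetD iv 1 0, "end")])) t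
      = ((l.map (fun iv => PySem.List.pyGetD iv 0 0)).countP (fun s => decide (s ≤ t)) : Int)
        - ((l.map (fun iv => PySem.List.pyGetD iv 1 0)).countP (fun s => decide (s ≤ t)) : Int) := by
  intro l
  induction l with
  | nil => simp [cum]
  | cons iv l ih =>
    simp only [List.flatMap_cons, List.map_cons, List.countP_cons]
    unfold cum at ih ⊢
    simp only [List.map_append, List.sum_append]
    rw [ih]
    simp only [List.map_cons, List.map_nil, List.sum_cons, List.sum_nil, wt]
    by_cases h0 : PySem.List.pyGetD iv 0 0 ≤ t <;>
      by_cases h1 : PySem.List.pyGetD iv 1 0 ≤ t <;>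
      simp [h0, h1] <;> omega

lemma calculate_engagement_eq_segsA (intervals : List (List Int)) (h : intervals ≠ []) :
    calculate_engagement intervals
      = segsA 0 (PySem.List.sorted2
          (intervals.flatMap (fun iv =>
            [(PySem.List.pyGetD iv 0 0, "start"), (PySem.List.pyGetD iv 1 0, "end")]))
          Prod.fst Prod.snd false) := by
  unfold calculate_engagement
  rw [if_neg h]
  simp only [PySem.List.foldl_append_eq_flatMap, List.nil_append]
  rw [idx_loop_eq_zip, zip_fold_eq_segsA, List.nil_append]

lemma calculate_engagement_alt_eq_segsC (intervals : List (List Int)) :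
    calculate_engagement_alt intervals
      = segsC
          (cum (PySem.List.sorted2
            (intervals.flatMap (fun iv =>
              [(PySem.List.pyGetD iv 0 0, "start"), (PySem.List.pyGetD iv 1 0, "end")]))
            Prod.fst Prod.snd false))
          (dtimes ((PySem.List.sorted2
            (intervals.flatMap (fun iv =>
              [(PySem.List.pyGetD iv 0 0, "start"), (PySem.List.pyGetD iv 1 0, "end")]))
            Prod.fst Prod.snd false).map Prod.fst)) := by
  set EV := intervals.flatMap (fun iv =>
    [(PySem.List.pyGetD iv 0 0, "start"), (PySem.List.pyGetD iv 1 0, "end")]) with hEV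
  set E := PySem.List.sorted2 EV Prod.fst Prod.snd false with hE
  have hperm : E.Perm EV := PySem.List.sorted2_perm EV Prod.fst Prod.snd false
  have hEPW : (E.map Prod.fst).Pairwise (· ≤ ·) :=
    List.Pairwise.map Prod.fst (fun a b hab => hab) (sorted2_pairwise_fst EV)
  unfold calculate_engagement_alt
  set starts := PySem.List.sorted (intervals.map (fun iv => PySem.List.pyGetD iv 0 0)) (fun s => s) false with hstarts
  set ends := PySem.List.sorted (intervals.map (fun iv => PySem.List.pyGetD iv 1 0)) (fun s => s) false with hends
  set times := PySem.List.sorted (PySem.Set.ofList (starts ++ ends)) (fun t => t) false with htimesdef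
  have hndt : (dtimes (E.map Prod.fst)).Nodup :=
    ((dtimes_pairwise_lt _ hEPW).imp (fun hab => ne_of_lt hab))
  -- times == the ordered distinct event times
  have htimes : times = dtimes (E.map Prod.fst) := by
    rw [htimesdef]
    apply PySem.List.sorted_eq_of_perm_of_pairwise_lt
    · rw [List.perm_ext_iff_of_nodup hndt (PySem.Set.nodup_ofList _)]
      intro a
      rw [mem_dtimes_iff, PySem.Set.mem_ofList, List.mem_append]
      rw [hstarts, hends, PySem.List.mem_sorted, PySem.List.mem_sorted]
      have hEVm : a ∈ E.map Prod.fst ↔ a ∈ EV.map Prod.fst := (hperm.map Prod.fst).mem_iff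
      rw [hEVm]
      have hmapEV : EV.map Prod.fst
          = intervals.flatMap (fun iv => [PySem.List.pyGetD iv 0 0, PySem.List.pyGetD iv 1 0]) := by
        rw [hEV, List.map_flatMap]
        simp
      rw [hmapEV]
      simp only [List.mem_flatMap, List.mem_cons, List.not_mem_nil, or_false, List.mem_map]
      constructor
      · rintro ⟨iv, hiv, h | h⟩
        · exact Or.inl ⟨iv, hiv, h.symm⟩
        · exact Or.inr ⟨iv, hiv, h.symm⟩
      · rintro (⟨iv, hiv, h⟩ | ⟨iv, hiv, h⟩)
        · exact ⟨iv, hiv, Or.inl h.symm⟩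
        · exact ⟨iv, hiv, Or.inr h.symm⟩
    · exact dtimes_pairwise_lt _ hEPW
  -- the per-segment counting function equals the cumulative engagement
  have hF : ∀ t : Int,
      (PySem.List.bisectRight starts t : Int) - (PySem.List.bisectRight ends t : Int) = cum E t := by
    intro t
    have hsp : starts.Pairwise (· ≤ ·) := by
      rw [hstarts]; exact PySem.List.sorted_pairwise _ _
    have hep : ends.Pairwise (· ≤ ·) := by
      rw [hends]; exact PySem.List.sorted_pairwise _ _
    have hcum : cum E t = cum EV t :=
      List.Perm.sum_eq (hperm.map (fun e => if e.1 ≤ t then wt e.2 else 0))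
    rw [hcum, hEV, cum_flatMap]
    have hcs : starts.countP (fun s => decide (s ≤ t))
        = (intervals.map (fun iv => PySem.List.pyGetD iv 0 0)).countP (fun s => decide (s ≤ t)) :=
      List.Perm.countP_eq _ (by rw [hstarts]; exact PySem.List.sorted_perm _ _ _)
    have hce : ends.countP (fun s => decide (s ≤ t))
        = (intervals.map (fun iv => PySem.List.pyGetD iv 1 0)).countP (fun s => decide (s ≤ t)) :=
      List.Perm.countP_eq _ (by rw [hends]; exact PySem.List.sorted_perm _ _ _)
    rw [bisectRight_eq_countP starts t hsp, bisectRight_eq_countP ends t hep, hcs, hce]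
  -- the loop is segsC of that function over times
  rw [idx_loopB_eq_zip times
    (fun t => (PySem.List.bisectRight starts t : Int) - (PySem.List.bisectRight ends t : Int)) []]
  rw [zip_fold_eq_segsC
    (fun t => (PySem.List.bisectRight starts t : Int) - (PySem.List.bisectRight ends t : Int))
    times []]
  rw [List.nil_append, htimes]
  have : (fun t => (PySem.List.bisectRight starts t : Int) - (PySem.List.bisectRight ends t : Int))
      = cum E := funext hF
  rw [this]

-- ===== VERDICT (by name: the statement is the Claim_ definition above) =====
theorem calculate_engagement_spec : Claim_equal_calculate_engagement := by
  intro intervals _ _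
  unfold Spec_calculate_engagement
  by_cases hnil : intervals = []
  · subst hnil; rfl
  · rw [calculate_engagement_eq_segsA intervals hnil,
        calculate_engagement_alt_eq_segsC intervals]
    set EV := intervals.flatMap (fun iv =>
      [(PySem.List.pyGetD iv 0 0, "start"), (PySem.List.pyGetD iv 1 0, "end")]) with hEV
    set E := PySem.List.sorted2 EV Prod.fst Prod.snd false with hE
    have hEPW : (E.map Prod.fst).Pairwise (· ≤ ·) :=
      List.Pairwise.map Prod.fst (fun a b hab => hab) (sorted2_pairwise_fst EV)
    rw [segsA_eq_segsB 0 E (sorted2_pairwise_fst EV)]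
    apply segsB_eq_segsC
    · exact dtimes_pairwise_lt _ hEPW
    · intro e he
      exact Or.inl ((mem_dtimes_iff _ _).mpr (List.mem_map_of_mem he))
    · intro hd hhd
      have hmin : ∀ s ∈ dtimes (E.map Prod.fst), hd ≤ s := by
        have hPW := dtimes_pairwise_lt _ hEPW
        rcases hdt : dtimes (E.map Prod.fst) with _ | ⟨a, u⟩
        · rw [hdt] at hhd; simp at hhd
        · rw [hdt] at hhd hPW
          have ha : a = hd := by simpa using hhd
          subst ha
          intro s hs
          rcases List.mem_cons.mp hs with rfl | hs
          · exact le_refl _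
          · exact le_of_lt ((List.pairwise_cons.mp hPW).1 _ hs)
      unfold cumlt
      symm
      apply List.sum_eq_zero
      intro x hx
      simp only [List.mem_map] at hx
      obtain ⟨e, he, rfl⟩ := hx
      have : hd ≤ e.1 := hmin e.1 ((mem_dtimes_iff _ _).mpr (List.mem_map_of_mem he))
      simp [not_lt.mpr this]
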